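-- pv_equiv track=rewrite | github.com/isarandi/barecat | src/barecat/util/glob_to_regex.py | glob_to_sqlite
-- ===== SOURCE A (Python) =====
-- def glob_to_sqlite(pat):
--     """Convert Python glob pattern to SQLite GLOB pattern.
--
--     Handles the differences between Python glob and SQLite GLOB:
--     - Python uses [!...] for negation, SQLite uses [^...]
--     - Python treats [^...] as a bracket with literal ^, SQLite treats it as negation
--
--     Transformations:
--     - [!] (invalid, literal) -> [[]!]
--     - [!X...] (negation) -> [^X...]
--     - [^] (bracket with ^) -> ^
--     - [^^^...] (only carets) -> ^
--     - [^^X...] (leading carets) -> [X...^^]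
--     - Unclosed [ -> [[]
--     """
--     # Fast path: if no opening bracket, no conversion needed
--     if '[' not in pat:
--         return pat
--
--     res = []
--     i, n = 0, len(pat)
--     while i < n:
--         c = pat[i]
--         i += 1
--         if c == '[':
--             j = i
--             negate = False
--             if j < n and pat[j] == '!':
--                 negate = True
--                 j += 1
--             content_start = j
--             # First char after [! can be ] and it's literal content
--             if j < n and pat[j] == ']':
--                 j += 1
--             while j < n and pat[j] != ']':
--                 j += 1
--             if j >= n:
--                 # Unclosed bracket - literal [
--                 res.append('[[]')
--             else:
--                 content = pat[content_start:j]
--                 if negate: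
--                     if content == '':
--                         # [!] - nothing to negate, literal [!]
--                         res.append('[[]!]')
--                     else:
--                         # [!X...] -> [^X...]
--                         res.append('[^' + content + ']')
--                 else:
--                     # Count leading ^ chars
--                     num_carets = 0
--                     while num_carets < len(content) and content[num_carets] == '^':
--                         num_carets += 1
--                     if num_carets == len(content) and content:
--                         # Content is ONLY ^ chars -> single ^
--                         res.append('^')
--                     elif num_carets > 0:
--                         # Move all leading ^ to end: [^^a] -> [a^^]
--                         rest = content[num_carets:]
--                         carets = '^' * num_carets
--                         res.append('[' + rest + carets + ']')
--                     else:
--                         res.append('[' + content + ']')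
--                 i = j + 1
--         else:
--             res.append(c)
--     return ''.join(res)
-- ===== SOURCE B (Python) =====
-- def _bracket(content, negate):
--     """Render one closed bracket construct as SQLite GLOB text."""
--     if negate:
--         return '[[]!]' if not content else '[^' + content + ']'
--     stripped = content.lstrip('^')
--     k = len(content) - len(stripped)
--     if k and not stripped:
--         return '^'
--     if k:
--         return '[' + stripped + '^' * k + ']'
--     return '[' + content + ']'
--
--
-- def glob_to_sqlite(pat):
--     """Convert Python glob pattern to SQLite GLOB pattern (recursive, find/slice based)."""
--     if '[' not in pat:
--         return pat
--     pre, _, rest = pat.partition('[')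
--     negate = rest.startswith('!')
--     body = rest[1:] if negate else rest
--     close = body.find(']', 1 if body.startswith(']') else 0)
--     if close == -1:
--         # unclosed bracket: literal '[', rest reprocessed
--         return pre + '[[]' + glob_to_sqlite(rest)
--     return pre + _bracket(body[:close], negate) + glob_to_sqlite(body[close + 1:])
-- ===== Notes on version B (the rewrite author's own statement) =====
-- stated objective: simpler
-- what changed: Replaces A's manual index-based character scanner (while loop with absolute indices i/j and an explicit result buffer) with a short recursion that peels off one bracket construct per step using partition/startswith/find slicing, with the bracket-free fast path as its base case.
import Mathlib
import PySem

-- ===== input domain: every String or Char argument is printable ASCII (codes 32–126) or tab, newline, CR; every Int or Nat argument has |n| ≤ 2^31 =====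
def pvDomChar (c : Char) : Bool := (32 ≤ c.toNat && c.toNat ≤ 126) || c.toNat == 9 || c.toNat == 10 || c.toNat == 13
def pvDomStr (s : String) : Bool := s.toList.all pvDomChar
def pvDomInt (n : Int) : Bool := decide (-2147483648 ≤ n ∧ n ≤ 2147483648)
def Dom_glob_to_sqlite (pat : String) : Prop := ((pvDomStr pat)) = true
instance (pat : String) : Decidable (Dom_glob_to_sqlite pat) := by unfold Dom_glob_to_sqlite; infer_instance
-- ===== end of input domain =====

-- B replaces A's manual index-based scanner with a short recursion that peels off one bracket
-- construct per step via partition/find-style slicing (objective: simpler; return value proved equal).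

-- ===== PORT A =====
-- port of A's inner scan: while j < n and pat[j] != ']': j += 1
def pvScanCloseA (p : List Char) (j : Nat) : Nat :=
  if _ : j < p.length then
    if p.getD j ' ' = ']' then j else pvScanCloseA p (j + 1)
  else j
termination_by p.length - j

-- port of A's caret count: while num_carets < len(content) and content[num_carets] == '^': num_carets += 1
def pvCountCaretsA (content : List Char) (k : Nat) : Nat :=
  if _ : k < content.length then
    if content.getD k ' ' = '^' then pvCountCaretsA content (k + 1) else k
  else k
termination_by content.length - k

-- A's straight-line bracket handling, with its intermediate values named:
def pvNegateA (p : List Char) (i : Nat) : Bool :=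
  decide (i + 1 < p.length ∧ p.getD (i + 1) ' ' = '!')
def pvJ1A (p : List Char) (i : Nat) : Nat := if pvNegateA p i then i + 2 else i + 1
def pvJ2A (p : List Char) (i : Nat) : Nat :=
  if pvJ1A p i < p.length ∧ p.getD (pvJ1A p i) ' ' = ']' then pvJ1A p i + 1 else pvJ1A p i
def pvJA (p : List Char) (i : Nat) : Nat := pvScanCloseA p (pvJ2A p i)
def pvContentA (p : List Char) (i : Nat) : List Char :=
  (p.drop (pvJ1A p i)).take (pvJA p i - pvJ1A p i)

def pvPieceA (content : List Char) (negate : Bool) : List Char :=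
  if negate then
    if content = [] then ['[', '[', ']', '!', ']']
    else '[' :: '^' :: (content ++ [']'])
  else
    if pvCountCaretsA content 0 = content.length ∧ content ≠ [] then ['^']
    else if 0 < pvCountCaretsA content 0 then
      '[' :: (content.drop (pvCountCaretsA content 0) ++
              List.replicate (pvCountCaretsA content 0) '^' ++ [']'])
    else '[' :: (content ++ [']'])

-- (piece appended, index the loop resumes at)
def pvGlobABracket (p : List Char) (i : Nat) : List Char × Nat :=
  if p.length ≤ pvJA p i then (['[', '[', ']'], i + 1)
  else (pvPieceA (pvContentA p i) (pvNegateA p i), pvJA p i + 1)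

-- cited by pvGlobALoop's decreasing_by
theorem pvScanCloseA_ge (p : List Char) (j : Nat) : j ≤ pvScanCloseA p j := by
  unfold pvScanCloseA
  split
  · split
    · exact le_rfl
    · have := pvScanCloseA_ge p (j + 1); omega
  · exact le_rfl
termination_by p.length - j

theorem pvGlobABracket_gt (p : List Char) (i : Nat) : i < (pvGlobABracket p i).2 := by
  have h1 : i + 1 ≤ pvJ1A p i := by unfold pvJ1A; split <;> omega
  have h2 : pvJ1A p i ≤ pvJ2A p i := by unfold pvJ2A; split <;> omega
  have h3 : pvJ2A p i ≤ pvJA p i := pvScanCloseA_ge p (pvJ2A p i)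
  unfold pvGlobABracket
  split <;> simp <;> omega

-- A's main loop: res is the list of appended pieces, joined at the end
def pvGlobALoop (p : List Char) (i : Nat) : List (List Char) :=
  if _ : i < p.length then
    if p.getD i ' ' = '[' then
      (pvGlobABracket p i).1 :: pvGlobALoop p (pvGlobABracket p i).2
    else [p.getD i ' '] :: pvGlobALoop p (i + 1)
  else []
termination_by p.length - i
decreasing_by
  · have := pvGlobABracket_gt p i; omega
  · omega

def glob_to_sqlite (pat : String) : String :=
  if pat.toList.contains '[' = false then pat
  else String.ofList (pvGlobALoop pat.toList 0).flatten

-- ===== PORT B =====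
-- content.lstrip('^') and the number of stripped carets
def pvStripB (content : List Char) : List Char := content.dropWhile (· = '^')
def pvKB (content : List Char) : Nat := content.length - (pvStripB content).length

def pvBracketB (content : List Char) (negate : Bool) : List Char :=
  if negate then
    if content.isEmpty then ['[', '[', ']', '!', ']'] else '[' :: '^' :: content ++ [']']
  else if pvKB content ≠ 0 ∧ (pvStripB content).isEmpty then ['^']
  else if pvKB content ≠ 0 then
    '[' :: (pvStripB content ++ List.replicate (pvKB content) '^' ++ [']'])
  else '[' :: (content ++ [']'])

-- body.find(']', start), hand-ported (exact for 0 ≤ start ≤ len(body) and a 1-char needle):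
-- some index of the first ']' at position ≥ start, none if absent (Python's -1)
def pvFindCloseB (body : List Char) (start : Nat) : Option Nat :=
  ((body.drop start).findIdx? (· = ']')).map (· + start)

-- pat.partition('[') tail, rest.startswith('!'), body, and the find start offset
def pvRestB (p : List Char) : List Char := (p.dropWhile (· ≠ '[')).tail
def pvNegB (rest : List Char) : Bool := rest.head? == some '!'
def pvBodyB (rest : List Char) : List Char := if pvNegB rest then rest.tail else rest
def pvStartB (body : List Char) : Nat := if body.head? == some ']' then 1 else 0

-- cited by pvGlobBCore's decreasing_by
theorem pvRestB_lt (p : List Char) (h : p.contains '[' = true) :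
    (pvRestB p).length < p.length := by
  have hsum := congrArg List.length
    (List.takeWhile_append_dropWhile (p := fun x => decide (x ≠ '[')) (l := p))
  rw [List.length_append] at hsum
  have hne : p.dropWhile (fun x => decide (x ≠ '[')) ≠ [] := by
    intro hnil
    rw [List.dropWhile_eq_nil_iff] at hnil
    have hmem : '[' ∈ p := by simpa using h
    simpa using hnil _ hmem
  have hpos : 0 < (p.dropWhile (fun x => decide (x ≠ '['))).length :=
    List.length_pos_iff.mpr hne
  unfold pvRestB
  simp only [List.length_tail]
  omega

theorem pvBodyB_le (rest : List Char) : (pvBodyB rest).length ≤ rest.length := by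
  unfold pvBodyB; split
  · simpa using List.length_tail_le rest
  · exact le_rfl

def pvGlobBCore (p : List Char) : List Char :=
  if h : p.contains '[' then
    match pvFindCloseB (pvBodyB (pvRestB p)) (pvStartB (pvBodyB (pvRestB p))) with
    | none =>
        p.takeWhile (· ≠ '[') ++ ['[', '[', ']'] ++ pvGlobBCore (pvRestB p)
    | some close =>
        p.takeWhile (· ≠ '[') ++
          pvBracketB ((pvBodyB (pvRestB p)).take close) (pvNegB (pvRestB p)) ++
          pvGlobBCore ((pvBodyB (pvRestB p)).drop (close + 1))
  else p
termination_by p.length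
decreasing_by
  · exact pvRestB_lt p h
  · have h1 := pvRestB_lt p h
    have h2 := pvBodyB_le (pvRestB p)
    have h3 : ((pvBodyB (pvRestB p)).drop (close + 1)).length ≤ (pvBodyB (pvRestB p)).length := by
      rw [List.length_drop]; omega
    omega

def glob_to_sqlite_alt (pat : String) : String := String.ofList (pvGlobBCore pat.toList)

-- ===== PRECONDITION & SPEC =====
def Spec_glob_to_sqlite (pat : String) (out : String) : Prop := out = glob_to_sqlite_alt pat
instance (pat : String) (out : String) : Decidable (Spec_glob_to_sqlite pat out) := by unfold Spec_glob_to_sqlite; infer_instance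

-- ===== CLAIM (what is proved, stated in full; the proofs are below) =====
def Claim_equal_glob_to_sqlite : Prop := ∀ (pat : String), Dom_glob_to_sqlite pat → Spec_glob_to_sqlite pat (glob_to_sqlite pat)

-- ===== LEMMAS AND PROOFS =====

-- distance from the head to the first ']' (length if absent)
def pvScanLen : List Char → Nat
  | [] => 0
  | c :: l => if c = ']' then 0 else pvScanLen l + 1

theorem pvScanLen_le (l : List Char) : pvScanLen l ≤ l.length := by
  induction l with
  | nil => simp [pvScanLen]
  | cons c l ih => simp only [pvScanLen, List.length_cons]; split <;> omega

theorem pvDropHead (l : List Char) (j : Nat) (h : j < l.length) :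
    l.drop j = l.getD j ' ' :: l.drop (j + 1) := by
  rw [List.getD_eq_getElem?_getD, List.getElem?_eq_getElem h]
  simpa using List.drop_eq_getElem_cons h

theorem pvScanCloseA_eq (p : List Char) (j : Nat) :
    pvScanCloseA p j = j + pvScanLen (p.drop j) := by
  unfold pvScanCloseA
  split
  · rename_i h
    by_cases hc : p.getD j ' ' = ']'
    · rw [if_pos hc, pvDropHead p j h]
      simp only [pvScanLen, if_pos hc]
      omega
    · rw [if_neg hc, pvScanCloseA_eq p (j + 1), pvDropHead p j h]
      simp only [pvScanLen, if_neg hc]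
      omega
  · rename_i h
    rw [List.drop_eq_nil_of_le (by omega)]
    simp [pvScanLen]
termination_by p.length - j

theorem pvFindIdx_eq_scanLen (l : List Char) :
    l.findIdx? (· = ']') = if pvScanLen l < l.length then some (pvScanLen l) else none := by
  induction l with
  | nil => simp [pvScanLen]
  | cons c l ih =>
    rw [List.findIdx?_cons]
    by_cases hc : c = ']'
    · simp [hc, pvScanLen]
    · simp only [hc, decide_false, Bool.false_eq_true, if_false, ih]
      have hs : pvScanLen (c :: l) = pvScanLen l + 1 := by simp [pvScanLen, hc]
      by_cases hS : pvScanLen l < l.length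
      · rw [if_pos hS, if_pos (by rw [hs]; simp; omega)]
        simp [hs]
      · rw [if_neg hS, if_neg (by rw [hs]; simp; omega)]
        simp

theorem pvCountCaretsA_eq (content : List Char) (k : Nat) :
    pvCountCaretsA content k = k + ((content.drop k).takeWhile (· = '^')).length := by
  unfold pvCountCaretsA
  split
  · rename_i h
    by_cases hc : content.getD k ' ' = '^'
    · rw [if_pos hc, pvCountCaretsA_eq content (k + 1), pvDropHead content k h]
      simp only [List.takeWhile_cons, hc, decide_true, if_true, List.length_cons]
      omega
    · rw [if_neg hc, pvDropHead content k h]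
      have hd : (decide (content.getD k ' ' = '^')) = false := by simpa using hc
      simp only [List.takeWhile_cons, hd, Bool.false_eq_true, if_false, List.length_nil]
      omega
  · rename_i h
    rw [List.drop_eq_nil_of_le (by omega)]
    simp
termination_by content.length - k

-- A's piece computation equals B's
theorem pvDropWhile_eq_drop (l : List Char) :
    l.dropWhile (· = '^') = l.drop (l.takeWhile (· = '^')).length := by
  induction l with
  | nil => simp
  | cons c t ih =>
    by_cases hc : c = '^'
    · simp [List.dropWhile_cons, List.takeWhile_cons, hc, ih]
    · simp [List.dropWhile_cons, List.takeWhile_cons, hc]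

theorem pvPiece_eq (content : List Char) (negate : Bool) :
    pvPieceA content negate = pvBracketB content negate := by
  cases negate with
  | true =>
    unfold pvPieceA pvBracketB
    by_cases he : content = []
    · simp [he]
    · simp [he]
  | false =>
    have hcc : pvCountCaretsA content 0 = (content.takeWhile (· = '^')).length := by
      simpa using pvCountCaretsA_eq content 0
    have hlen : (content.takeWhile (· = '^')).length + (content.dropWhile (· = '^')).length
        = content.length := by
      have := congrArg List.length
        (List.takeWhile_append_dropWhile (p := fun x => decide (x = '^')) (l := content))
      rwa [List.length_append] at this
    have hdrop : content.drop (content.takeWhile (· = '^')).length = content.dropWhile (· = '^') :=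
      (pvDropWhile_eq_drop content).symm
    unfold pvPieceA pvBracketB pvKB pvStripB
    have hK : content.length - (content.dropWhile (· = '^')).length
        = (content.takeWhile (· = '^')).length := by omega
    have c1 : ((0 < (content.takeWhile (· = '^')).length) ∧
          (content.dropWhile (· = '^')).isEmpty = true)
        ↔ ((content.takeWhile (· = '^')).length = content.length ∧ content ≠ []) := by
      constructor
      · rintro ⟨hk0, hemp⟩
        have hd0 : (content.dropWhile (· = '^')).length = 0 := by
          simpa [List.isEmpty_iff, List.length_eq_zero_iff] using hemp
        refine ⟨by omega, fun h0 => ?_⟩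
        subst h0
        simp at hk0
      · rintro ⟨heq, hne⟩
        have hc0 : content.length ≠ 0 := fun h0 => hne (List.length_eq_zero_iff.mp h0)
        have hd0 : (content.dropWhile (· = '^')).length = 0 := by omega
        exact ⟨by omega, by simpa [List.isEmpty_iff] using List.length_eq_zero_iff.mp hd0⟩
    have c2 : ((content.takeWhile (· = '^')).length ≠ 0)
        ↔ (0 < (content.takeWhile (· = '^')).length) := by omega
    simp only [Bool.false_eq_true, if_false, hcc, hdrop, hK, c1, c2]

-- shifting A's absolute indices by one cons cell
theorem pvNegateA_cons (x : Char) (p : List Char) (i : Nat) :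
    pvNegateA (x :: p) (i + 1) = pvNegateA p i := by
  simp only [pvNegateA, List.length_cons, List.getD_cons_succ]
  rw [decide_eq_decide]
  constructor <;> rintro ⟨h1, h2⟩ <;> exact ⟨by omega, h2⟩

theorem pvJ1A_cons (x : Char) (p : List Char) (i : Nat) :
    pvJ1A (x :: p) (i + 1) = pvJ1A p i + 1 := by
  unfold pvJ1A
  rw [pvNegateA_cons]
  split <;> omega

theorem pvJ2A_cons (x : Char) (p : List Char) (i : Nat) :
    pvJ2A (x :: p) (i + 1) = pvJ2A p i + 1 := by
  simp only [pvJ2A, pvJ1A_cons, List.length_cons, List.getD_cons_succ]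
  have hiff : (pvJ1A p i + 1 < p.length + 1 ∧ p.getD (pvJ1A p i) ' ' = ']')
      ↔ (pvJ1A p i < p.length ∧ p.getD (pvJ1A p i) ' ' = ']') := by
    constructor <;> rintro ⟨h1, h2⟩ <;> exact ⟨by omega, h2⟩
  rw [if_congr hiff rfl rfl]
  split <;> omega

theorem pvJA_cons (x : Char) (p : List Char) (i : Nat) :
    pvJA (x :: p) (i + 1) = pvJA p i + 1 := by
  unfold pvJA
  rw [pvJ2A_cons, pvScanCloseA_eq, pvScanCloseA_eq, List.drop_succ_cons]
  omega

theorem pvContentA_cons (x : Char) (p : List Char) (i : Nat) :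
    pvContentA (x :: p) (i + 1) = pvContentA p i := by
  unfold pvContentA
  rw [pvJ1A_cons, pvJA_cons, List.drop_succ_cons]
  congr 1
  omega

theorem pvBracket_cons (x : Char) (p : List Char) (i : Nat) :
    pvGlobABracket (x :: p) (i + 1) = ((pvGlobABracket p i).1, (pvGlobABracket p i).2 + 1) := by
  unfold pvGlobABracket
  rw [pvJA_cons, pvContentA_cons, pvNegateA_cons]
  simp only [List.length_cons]
  by_cases hcond : p.length ≤ pvJA p i
  · rw [if_pos (by omega), if_pos hcond]
  · rw [if_neg (by omega), if_neg hcond]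

theorem pvLoop_cons (x : Char) (p : List Char) (i : Nat) :
    pvGlobALoop (x :: p) (i + 1) = pvGlobALoop p i := by
  unfold pvGlobALoop
  by_cases h : i < p.length
  · rw [dif_pos (by simp only [List.length_cons]; omega), dif_pos h]
    simp only [List.getD_cons_succ]
    by_cases hbr : p.getD i ' ' = '['
    · rw [if_pos hbr, if_pos hbr, pvBracket_cons]
      have hrec := pvLoop_cons x p (pvGlobABracket p i).2
      simp only [hrec]
    · rw [if_neg hbr, if_neg hbr, pvLoop_cons x p (i + 1)]
  · rw [dif_neg (by simp only [List.length_cons]; omega), dif_neg h]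
termination_by p.length - i
decreasing_by
  · have := pvGlobABracket_gt p i; omega
  · omega

theorem pvLoop_nil (m : Nat) : pvGlobALoop [] m = [] := by
  unfold pvGlobALoop
  simp

theorem pvLoop_drop (i : Nat) (p : List Char) :
    pvGlobALoop p i = pvGlobALoop (p.drop i) 0 := by
  induction i generalizing p with
  | zero => simp
  | succ n ih =>
    cases p with
    | nil => rw [List.drop_nil, pvLoop_nil, pvLoop_nil]
    | cons x p => rw [List.drop_succ_cons, pvLoop_cons, ih]

theorem pvLoop_cons_zero (x : Char) (p : List Char) (hx : x ≠ '[') :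
    pvGlobALoop (x :: p) 0 = [x] :: pvGlobALoop p 0 := by
  conv_lhs => rw [pvGlobALoop.eq_def]
  rw [dif_pos (by simp), if_neg (by simpa [List.getD_cons_zero] using hx)]
  rw [List.getD_cons_zero, pvLoop_cons]

theorem pvLoop_noBr (p : List Char) (h : p.contains '[' = false) :
    (pvGlobALoop p 0).flatten = p := by
  induction p with
  | nil => rw [pvLoop_nil]; rfl
  | cons x p ih =>
    simp only [List.contains_cons, Bool.or_eq_false_iff, beq_eq_false_iff_ne] at h
    rw [pvLoop_cons_zero x p (Ne.symm h.1)]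
    simp only [List.flatten_cons, List.singleton_append]
    rw [ih h.2]

theorem pvLoop_prefix (pre q : List Char) (h : pre.contains '[' = false) :
    pvGlobALoop (pre ++ q) 0 = pre.map (fun c => [c]) ++ pvGlobALoop q 0 := by
  induction pre with
  | nil => simp
  | cons x pre ih =>
    simp only [List.contains_cons, Bool.or_eq_false_iff, beq_eq_false_iff_ne] at h
    rw [List.cons_append, pvLoop_cons_zero x _ (Ne.symm h.1), ih h.2]
    simp

-- A's bracket handling at the head of '[' :: rest, phrased in B's terms
theorem pvNegA_head (rest : List Char) : pvNegateA ('[' :: rest) 0 = pvNegB rest := by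
  cases rest with
  | nil => simp [pvNegateA, pvNegB]
  | cons c t =>
    simp only [pvNegateA, pvNegB, List.head?_cons]
    by_cases hc : c = '!'
    · simp [hc]
    · simp [hc, List.getD_cons_succ, List.getD_cons_zero]

theorem pvJ1A_head (rest : List Char) :
    pvJ1A ('[' :: rest) 0 = if pvNegB rest then 2 else 1 := by
  unfold pvJ1A
  rw [pvNegA_head]

theorem pvBody_head (rest : List Char) :
    ('[' :: rest).drop (pvJ1A ('[' :: rest) 0) = pvBodyB rest := by
  rw [pvJ1A_head]
  unfold pvBodyB
  cases hneg : pvNegB rest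
  · simp
  · simp [List.drop_one]

theorem pvJ1A_head_le (rest : List Char) :
    pvJ1A ('[' :: rest) 0 ≤ ('[' :: rest).length := by
  rw [pvJ1A_head]
  cases hneg : pvNegB rest
  · simp
  · unfold pvNegB at hneg
    cases rest with
    | nil => simp at hneg
    | cons c t => simp
 
theorem pvLen_head (rest : List Char) :
    ('[' :: rest).length = pvJ1A ('[' :: rest) 0 + (pvBodyB rest).length := by
  have h1 := pvJ1A_head_le rest
  have h2 := congrArg List.length (pvBody_head rest)
  rw [List.length_drop] at h2
  omega

theorem pvJ2A_head (rest : List Char) :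
    pvJ2A ('[' :: rest) 0 = pvJ1A ('[' :: rest) 0 + pvStartB (pvBodyB rest) := by
  unfold pvJ2A pvStartB
  have hgd : ('[' :: rest).getD (pvJ1A ('[' :: rest) 0) ' ' = (pvBodyB rest).getD 0 ' ' := by
    rw [List.getD_eq_getElem?_getD, List.getD_eq_getElem?_getD, ← pvBody_head rest,
      List.getElem?_drop, Nat.add_zero]
  have hlt : pvJ1A ('[' :: rest) 0 < ('[' :: rest).length ↔ pvBodyB rest ≠ [] := by
    rw [← pvBody_head rest]
    constructor
    · intro h hnil
      rw [List.drop_eq_nil_iff] at hnil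
      omega
    · intro h
      by_contra hle
      exact h (List.drop_eq_nil_iff.mpr (by omega))
  cases hb : pvBodyB rest with
  | nil =>
    rw [hb] at hlt
    have hnc : ¬(pvJ1A ('[' :: rest) 0 < ('[' :: rest).length ∧
        ('[' :: rest).getD (pvJ1A ('[' :: rest) 0) ' ' = ']') := by
      rintro ⟨hl, -⟩
      exact (hlt.mp hl) rfl
    rw [if_neg hnc]
    simp
  | cons b t =>
    rw [hb] at hgd hlt
    by_cases hc : b = ']'
    · subst hc
      rw [if_pos ⟨hlt.mpr (by simp), by rw [hgd]; simp⟩]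
      simp
    · have hnc : ¬(pvJ1A ('[' :: rest) 0 < ('[' :: rest).length ∧
          ('[' :: rest).getD (pvJ1A ('[' :: rest) 0) ' ' = ']') := by
        rintro ⟨-, hx⟩
        rw [hgd] at hx
        simp only [List.getD_cons_zero] at hx
        exact hc hx
      rw [if_neg hnc]
      simp [hc]

theorem pvStartB_le (body : List Char) : pvStartB body ≤ body.length := by
  unfold pvStartB
  cases body
  · simp
  · split <;> simp

theorem pvJA_head (rest : List Char) :
    pvJA ('[' :: rest) 0 = pvJ1A ('[' :: rest) 0 + pvStartB (pvBodyB rest)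
      + pvScanLen ((pvBodyB rest).drop (pvStartB (pvBodyB rest))) := by
  unfold pvJA
  rw [pvJ2A_head, pvScanCloseA_eq]
  have hd : ('[' :: rest).drop (pvJ1A ('[' :: rest) 0 + pvStartB (pvBodyB rest))
      = (pvBodyB rest).drop (pvStartB (pvBodyB rest)) := by
    rw [← pvBody_head rest, List.drop_drop]
    all_goals (congr 1; omega)
  rw [hd]

theorem pvBracket_char (rest : List Char) :
    pvGlobABracket ('[' :: rest) 0 =
      match pvFindCloseB (pvBodyB rest) (pvStartB (pvBodyB rest)) with
      | none => (['[', '[', ']'], 1)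
      | some close =>
          (pvPieceA ((pvBodyB rest).take close) (pvNegB rest),
           (if pvNegB rest then 2 else 1) + close + 1) := by
  have hS := pvScanLen_le ((pvBodyB rest).drop (pvStartB (pvBodyB rest)))
  rw [List.length_drop] at hS
  have hstart := pvStartB_le (pvBodyB rest)
  have hlen := pvLen_head rest
  have hja := pvJA_head rest
  unfold pvFindCloseB
  rw [pvFindIdx_eq_scanLen, List.length_drop]
  by_cases hlt : pvScanLen ((pvBodyB rest).drop (pvStartB (pvBodyB rest)))
      < (pvBodyB rest).length - pvStartB (pvBodyB rest)
  · rw [if_pos hlt]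
    simp only [Option.map_some]
    unfold pvGlobABracket
    rw [if_neg (by omega)]
    have hcont : pvContentA ('[' :: rest) 0
        = (pvBodyB rest).take (pvScanLen ((pvBodyB rest).drop (pvStartB (pvBodyB rest)))
            + pvStartB (pvBodyB rest)) := by
      unfold pvContentA
      rw [pvBody_head rest]
      congr 1
      omega
    rw [hcont, pvNegA_head, hja, pvJ1A_head]
    rw [Prod.mk.injEq]
    exact ⟨rfl, by omega⟩
  · rw [if_neg hlt]
    unfold pvGlobABracket
    rw [if_pos (by omega)]
    all_goals simp

theorem pvDrop_after (rest : List Char) (close : Nat) :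
    ('[' :: rest).drop ((if pvNegB rest then 2 else 1) + close + 1) =
      (pvBodyB rest).drop (close + 1) := by
  rw [← pvBody_head rest, List.drop_drop, pvJ1A_head]
  congr 1

theorem pvFlattenSingles (l : List Char) : (l.map (fun c => [c])).flatten = l := by
  induction l <;> simp [*]

theorem pvDropWhile_br (p : List Char) (h : p.contains '[' = true) :
    p.dropWhile (· ≠ '[') = '[' :: pvRestB p := by
  unfold pvRestB
  induction p with
  | nil => simp at h
  | cons a t ih =>
    by_cases ha : a = '['
    · subst ha
      simp [List.dropWhile_cons]
    · have ht : t.contains '[' = true := by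
        simp only [List.contains_cons, Bool.or_eq_true, beq_iff_eq] at h
        rcases h with h | h
        · exact absurd h.symm ha
        · exact h
      simp only [List.dropWhile_cons, ha, decide_true, ne_eq, not_false_iff, if_true]
      exact ih ht

theorem pvTakeWhile_noBr (p : List Char) :
    (p.takeWhile (· ≠ '[')).contains '[' = false := by
  induction p with
  | nil => simp
  | cons a t ih =>
    by_cases ha : a = '['
    · subst ha
      simp [List.takeWhile_cons]
    · simp [List.takeWhile_cons, ha, List.contains_cons, Ne.symm ha]
      simpa using ih

theorem pvMain (p : List Char) : (pvGlobALoop p 0).flatten = pvGlobBCore p := by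
  suffices H : ∀ (n : Nat) (p : List Char), p.length ≤ n →
      (pvGlobALoop p 0).flatten = pvGlobBCore p from H p.length p le_rfl
  intro n
  induction n with
  | zero =>
    intro p hp
    have hnil : p = [] := List.length_eq_zero_iff.mp (by omega)
    subst hnil
    rw [pvLoop_nil]
    unfold pvGlobBCore
    simp
  | succ n ih =>
    intro p hp
    by_cases hc : p.contains '[' = true
    · have hdw := pvDropWhile_br p hc
      have hp_eq : p = p.takeWhile (· ≠ '[') ++ '[' :: pvRestB p := by
        conv_lhs => rw [← List.takeWhile_append_dropWhile (p := fun x => decide (x ≠ '[')) (l := p)]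
        rw [hdw]
      have hpre := pvTakeWhile_noBr p
      have hlenp := congrArg List.length hp_eq
      rw [List.length_append, List.length_cons] at hlenp
      conv_lhs => rw [hp_eq]
      rw [pvLoop_prefix _ _ hpre, List.flatten_append, pvFlattenSingles]
      have hstep : pvGlobALoop ('[' :: pvRestB p) 0
          = (pvGlobABracket ('[' :: pvRestB p) 0).1
            :: pvGlobALoop ('[' :: pvRestB p) (pvGlobABracket ('[' :: pvRestB p) 0).2 := by
        conv_lhs => rw [pvGlobALoop.eq_def]
        rw [dif_pos (by simp), if_pos (by rw [List.getD_cons_zero])]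
      rw [hstep, pvBracket_char]
      conv_rhs => rw [pvGlobBCore.eq_def]
      rw [dif_pos hc]
      cases hfc : pvFindCloseB (pvBodyB (pvRestB p)) (pvStartB (pvBodyB (pvRestB p))) with
      | none =>
        dsimp only
        rw [pvLoop_drop, List.drop_one, List.tail_cons, List.flatten_cons]
        rw [ih (pvRestB p) (by omega)]
        simp
      | some close =>
        dsimp only
        rw [pvLoop_drop, pvDrop_after]
        have hblen : (pvBodyB (pvRestB p)).length ≤ (pvRestB p).length := pvBodyB_le _
        have hdlen : ((pvBodyB (pvRestB p)).drop (close + 1)).length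
            ≤ (pvBodyB (pvRestB p)).length := by
          rw [List.length_drop]; omega
        rw [List.flatten_cons, ih ((pvBodyB (pvRestB p)).drop (close + 1)) (by omega)]
        rw [pvPiece_eq]
        simp
    · have hcf : p.contains '[' = false := by
        cases h : p.contains '[' 
        · rfl
        · exact absurd h hc
      rw [pvLoop_noBr p hcf]
      conv_rhs => rw [pvGlobBCore.eq_def]
      rw [dif_neg (by rw [hcf]; exact Bool.false_ne_true)]

-- ===== VERDICT (by name: the statement is the Claim_ definition above) =====
theorem glob_to_sqlite_spec : Claim_equal_glob_to_sqlite := by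
  intro pat _
  unfold Spec_glob_to_sqlite glob_to_sqlite glob_to_sqlite_alt
  by_cases hc : pat.toList.contains '[' = false
  · rw [if_pos hc]
    have : pvGlobBCore pat.toList = pat.toList := by
      unfold pvGlobBCore
      rw [dif_neg (by rw [hc]; exact Bool.false_ne_true)]
    rw [this]; simp
  · rw [if_neg hc]
    exact congrArg String.ofList (pvMain pat.toList)
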